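-- pv_equiv track=rewrite | github.com/Mohamedhabi/flow_shop_scheduling | fsp/branch_and_bound.py | johnson_get_schedule
-- ===== SOURCE A (Python) =====
-- def johnson_get_schedule(sequence : list):
--     """
--     Returns the scheduling of jobs namely : finish dates on M1, start dates on M2 , finish dates on M2
--     """
--     acc = 0 # accumulates processing time on m1
--     dates1=[] # dates of finish on m1
--     dates2 = [] # dates of start on m2
--     dates3 = [] # dates of finish on m2
--     idx = 0
--     prevJob = None # saves the previous job
--     for job in sequence:
--         index,cost1,cost2 = job
--         acc = acc + job[1]
--         dates1.append((job[0],acc)) # append (job_index, finisht_time_m1)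
--         if idx == 0:
--             ## the first element always starts on m2 after it finishes on m1
--             dates2.append((index,cost1))
--             dates3.append((index,cost1+cost2))
--         else:
--             # not the first scheduled job we get the previous job
--             indexprev,cost1prev,cost2prev = prevJob
--             # start date will be the max between start of prev job + its cost and the finish date of this job on M1
--             date = max((dates2[idx-1][1] + cost2prev), dates1[idx][1])
--             dates2.append((index,date))
--             # the finish date of this job is its start date + its cost
--             dates3.append((index,date+cost2))
--
--         prevJob = job
--         idx+=1
--     return dates1,dates2,dates3
-- ===== SOURCE B (Python) =====
-- def johnson_get_schedule(sequence: list):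
--     """
--     Returns the scheduling of jobs namely : finish dates on M1, start dates on M2 , finish dates on M2
--     """
--     # Max-plus / critical-path closed form: with P1_i, C2_i the prefix sums of the
--     # M1 and M2 costs, finish_i on M2 = C2_i + max_{j<=i}(P1_j - C2_{j-1}) and
--     # start_i = C2_{i-1} + that max.  So one pass keeps prefix sums p1, c2 and the
--     # running maximum slack m = max_j (P1_j - C2_{j-1}); no prev-finish recurrence.
--     dates1 = []
--     dates2 = []
--     dates3 = []
--     p1 = 0
--     c2 = 0
--     m = None
--     for index, cost1, cost2 in sequence:
--         p1 += cost1
--         dates1.append((index, p1))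
--         slack = p1 - c2
--         m = slack if m is None else max(m, slack)
--         dates2.append((index, c2 + m))
--         c2 += cost2
--         dates3.append((index, c2 + m))
--     return dates1, dates2, dates3
-- ===== Notes on version B (the rewrite author's own statement) =====
-- stated objective: alternative
-- what changed: Replaced A's prev-job recurrence (start = max(prev start + prev cost2, this M1 finish), with idx counter, prevJob and list indexing) by the max-plus critical-path closed form: one pass keeps both prefix sums p1, c2 and a running maximum slack m = max_j (P1_j - C2_{j-1}), from which start = c2_before + m and finish = c2_after + m directly.
import Mathlib
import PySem

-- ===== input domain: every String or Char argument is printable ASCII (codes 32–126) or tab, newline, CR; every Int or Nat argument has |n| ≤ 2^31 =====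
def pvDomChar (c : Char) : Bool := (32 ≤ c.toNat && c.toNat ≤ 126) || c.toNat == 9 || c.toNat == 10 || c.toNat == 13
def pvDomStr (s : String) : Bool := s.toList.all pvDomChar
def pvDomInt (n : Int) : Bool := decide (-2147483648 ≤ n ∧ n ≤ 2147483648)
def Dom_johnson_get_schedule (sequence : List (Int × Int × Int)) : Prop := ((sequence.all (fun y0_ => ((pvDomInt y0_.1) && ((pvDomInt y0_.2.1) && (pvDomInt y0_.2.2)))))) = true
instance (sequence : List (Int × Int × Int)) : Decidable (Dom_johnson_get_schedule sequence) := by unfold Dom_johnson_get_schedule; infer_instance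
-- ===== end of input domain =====

-- B replaces A's prev-job recurrence by the max-plus critical-path closed form
-- (prefix sums of both machines plus a running maximum slack); objective: alternative.

-- ===== PORT A =====
-- the for-loop of A, whole mutable state as arguments (acc, dates1, dates2, dates3, idx, prevJob)
def johnsonA_loop : List (Int × Int × Int) → Int → List (Int × Int) → List (Int × Int) →
    List (Int × Int) → Int → Option (Int × Int × Int) →
    (List (Int × Int)) × (List (Int × Int)) × (List (Int × Int))
  | [], _, d1, d2, d3, _, _ => (d1, d2, d3)
  | job :: rest, acc, d1, d2, d3, idx, prevJob =>
    let index := job.1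
    let cost1 := job.2.1
    let cost2 := job.2.2
    let acc' := acc + cost1
    let d1' := d1 ++ [(index, acc')]
    if idx = 0 then
      johnsonA_loop rest acc' d1' (d2 ++ [(index, cost1)]) (d3 ++ [(index, cost1 + cost2)])
        (idx + 1) (some job)
    else
      -- Python unpacks prevJob (never None here); dates2[idx-1][1] and dates1[idx][1] are
      -- always in range, so the .getD defaults are never used
      let pj := prevJob.getD (0, 0, 0)
      let cost2prev := pj.2.2
      let date := max (((PySem.List.pyGet? d2 (idx - 1)).getD (0, 0)).2 + cost2prev)
                      (((PySem.List.pyGet? d1' idx).getD (0, 0)).2)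
      johnsonA_loop rest acc' d1' (d2 ++ [(index, date)]) (d3 ++ [(index, date + cost2)])
        (idx + 1) (some job)

def johnson_get_schedule (sequence : List (Int × Int × Int)) :
    (List (Int × Int)) × (List (Int × Int)) × (List (Int × Int)) :=
  johnsonA_loop sequence 0 [] [] [] 0 none

-- ===== PORT B =====
-- Source B's single pass: state = (p1, c2) prefix sums and m = running max slack (None before the first job)
def johnsonB_loop : List (Int × Int × Int) → Int → Int → Option Int →
    (List (Int × Int)) × (List (Int × Int)) × (List (Int × Int))
  | [], _, _, _ => ([], [], [])
  | (index, cost1, cost2) :: rest, p1, c2, m =>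
    let p1' := p1 + cost1
    let slack := p1' - c2
    let m' := match m with | none => slack | some mv => max mv slack
    let c2' := c2 + cost2
    let r := johnsonB_loop rest p1' c2' (some m')
    ((index, p1') :: r.1, (index, c2 + m') :: r.2.1, (index, c2' + m') :: r.2.2)

def johnson_get_schedule_alt (sequence : List (Int × Int × Int)) :
    (List (Int × Int)) × (List (Int × Int)) × (List (Int × Int)) :=
  johnsonB_loop sequence 0 0 none

-- ===== PRECONDITION & SPEC =====
def Spec_johnson_get_schedule (sequence : List (Int × Int × Int)) (out : (List (Int × Int)) × (List (Int × Int)) × (List (Int × Int))) : Prop := out = johnson_get_schedule_alt sequence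
instance (sequence : List (Int × Int × Int)) (out : (List (Int × Int)) × (List (Int × Int)) × (List (Int × Int))) : Decidable (Spec_johnson_get_schedule sequence out) := by unfold Spec_johnson_get_schedule; infer_instance

-- ===== CLAIM (what is proved, stated in full; the proofs are below) =====
def Claim_equal_johnson_get_schedule : Prop := ∀ (sequence : List (Int × Int × Int)), Dom_johnson_get_schedule sequence → Spec_johnson_get_schedule sequence (johnson_get_schedule sequence)

-- ===== LEMMAS AND PROOFS =====

-- A's loop after the first iteration equals B's loop, for any consistent state:
-- d2 ends with the previous start s, prevJob = (ip,c1p,c2p), idx = |e2|+1 = |d1|,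
-- and the previous finish on M2 agrees with B's closed form: s + c2p = c2 + m.
lemma johnsonA_loop_eq (rest : List (Int × Int × Int)) :
    ∀ (acc c2 m s c1p c2p ip i2 : Int) (d1 e2 d3 : List (Int × Int)),
    d1.length = e2.length + 1 →
    s + c2p = c2 + m →
    johnsonA_loop rest acc d1 (e2 ++ [(i2, s)]) d3 ((e2.length : Int) + 1) (some (ip, c1p, c2p))
      = (d1 ++ (johnsonB_loop rest acc c2 (some m)).1,
         (e2 ++ [(i2, s)]) ++ (johnsonB_loop rest acc c2 (some m)).2.1,
         d3 ++ (johnsonB_loop rest acc c2 (some m)).2.2) := by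
  induction rest with
  | nil =>
    intro acc c2 m s c1p c2p ip i2 d1 e2 d3 h hfin
    simp [johnsonA_loop, johnsonB_loop]
  | cons job rs ih =>
    intro acc c2 m s c1p c2p ip i2 d1 e2 d3 h hfin
    obtain ⟨ji, jc1, jc2⟩ := job
    have hidx : ((e2.length : Int) + 1) ≠ 0 := by positivity
    have hget2 : PySem.List.pyGet? (e2 ++ [(i2, s)]) (((e2.length : Int) + 1) - 1)
        = some (i2, s) := by
      have : ((e2.length : Int) + 1) - 1 = (e2.length : Int) := by ring
      rw [this]
      exact PySem.List.pyGet?_append_length (pre := e2) (y := (i2, s)) (ys := [])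
    have hget1 : PySem.List.pyGet? (d1 ++ [(ji, acc + jc1)]) ((e2.length : Int) + 1)
        = some (ji, acc + jc1) := by
      have : ((e2.length : Int) + 1) = (d1.length : Int) := by
        rw [h]; push_cast; ring
      rw [this]
      exact PySem.List.pyGet?_append_length (pre := d1) (y := (ji, acc + jc1)) (ys := [])
    -- A's date equals B's c2 + m'
    have hdate : max (s + c2p) (acc + jc1)
        = c2 + max m (acc + jc1 - c2) := by omega
    have hlen' : (d1 ++ [(ji, acc + jc1)]).length = (e2 ++ [(i2, s)]).length + 1 := by
      simp [h]
    have hfin' : (max (s + c2p) (acc + jc1)) + jc2 = (c2 + jc2) + max m (acc + jc1 - c2) := by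
      omega
    have hrec := ih (acc + jc1) (c2 + jc2) (max m (acc + jc1 - c2))
      (max (s + c2p) (acc + jc1)) jc1 jc2 ji ji
      (d1 ++ [(ji, acc + jc1)]) (e2 ++ [(i2, s)])
      (d3 ++ [(ji, max (s + c2p) (acc + jc1) + jc2)]) hlen' hfin'
    simp only [johnsonA_loop, if_neg hidx, Option.getD_some, hget2, hget1]
    have hcast : ((e2 ++ [(i2, s)]).length : Int) + 1 = ((e2.length : Int) + 1) + 1 := by
      have hl : (e2 ++ [(i2, s)]).length = e2.length + 1 := by simp
      rw [hl]; push_cast; ring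
    rw [← hcast] at *
    rw [hrec]
    simp only [johnsonB_loop]
    rw [hdate]
    simp [List.append_assoc, add_right_comm]

theorem johnson_get_schedule_spec_aux (sequence : List (Int × Int × Int)) :
    johnson_get_schedule sequence = johnson_get_schedule_alt sequence := by
  cases sequence with
  | nil => rfl
  | cons job rs =>
    obtain ⟨i, c1, c2⟩ := job
    show johnsonA_loop ((i, c1, c2) :: rs) 0 [] [] [] 0 none = _
    simp only [johnsonA_loop, if_true, List.nil_append]
    have := johnsonA_loop_eq rs c1 c2 c1 c1 c1 c2 i i [(i, c1)] [] [(i, c1 + c2)]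
      (by simp) (by ring)
    simp only [List.length_nil, Nat.cast_zero, zero_add, List.nil_append] at this
    simp only [zero_add] at *
    rw [this]
    simp only [johnson_get_schedule_alt, johnsonB_loop]
    simp [add_comm]

-- ===== VERDICT (by name: the statement is the Claim_ definition above) =====
theorem johnson_get_schedule_spec : Claim_equal_johnson_get_schedule := by
  intro sequence _
  exact johnson_get_schedule_spec_aux sequence
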